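-- pv_equiv track=rewrite | github.com/anirudhagar13/IR-Box | indexer.py | incidence_update
-- ===== SOURCE A (Python) =====
-- def incidence_update(incidence_mat, doc_id, doc_words):
-- 	'''
-- 	Creates / Updates incidence matrix : {term:{docid:tf,}}
-- 	'''
-- 	for term in doc_words:
-- 		if term not in incidence_mat:
-- 			# New term added
-- 			incidence_mat[term] = dict()
--
-- 		# Identifying document
-- 		doc_stat = incidence_mat[term]
--
-- 		if doc_id in doc_stat:
-- 			# Document already exists
-- 			doc_stat[doc_id] += 1
-- 		else:
-- 			# Add a new doc
-- 			doc_stat[doc_id] = 1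
--
-- 		# Updating document stats
-- 		incidence_mat[term] = doc_stat
--
-- 	return incidence_mat
-- ===== SOURCE B (Python) =====
-- def incidence_update(incidence_mat, doc_id, doc_words):
-- 	'''
-- 	Creates / Updates incidence matrix : {term:{docid:tf,}}
-- 	'''
-- 	# Phase 1: count term frequencies for this document in one pass
-- 	counts = {}
-- 	for w in doc_words:
-- 		counts[w] = counts.get(w, 0) + 1
--
-- 	# Phase 2: one batched update per distinct term (first-appearance order)
-- 	for term, c in counts.items():
-- 		doc_stat = incidence_mat.setdefault(term, {})
-- 		doc_stat[doc_id] = doc_stat.get(doc_id, 0) + c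
--
-- 	return incidence_mat
-- ===== Notes on version B (the rewrite author's own statement) =====
-- stated objective: alternative
-- what changed: Replaces the per-word-occurrence increment loop with a two-phase pass: build a term-frequency table for the document first, then do one batched setdefault/get update per distinct term in first-appearance order.
import Mathlib
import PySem

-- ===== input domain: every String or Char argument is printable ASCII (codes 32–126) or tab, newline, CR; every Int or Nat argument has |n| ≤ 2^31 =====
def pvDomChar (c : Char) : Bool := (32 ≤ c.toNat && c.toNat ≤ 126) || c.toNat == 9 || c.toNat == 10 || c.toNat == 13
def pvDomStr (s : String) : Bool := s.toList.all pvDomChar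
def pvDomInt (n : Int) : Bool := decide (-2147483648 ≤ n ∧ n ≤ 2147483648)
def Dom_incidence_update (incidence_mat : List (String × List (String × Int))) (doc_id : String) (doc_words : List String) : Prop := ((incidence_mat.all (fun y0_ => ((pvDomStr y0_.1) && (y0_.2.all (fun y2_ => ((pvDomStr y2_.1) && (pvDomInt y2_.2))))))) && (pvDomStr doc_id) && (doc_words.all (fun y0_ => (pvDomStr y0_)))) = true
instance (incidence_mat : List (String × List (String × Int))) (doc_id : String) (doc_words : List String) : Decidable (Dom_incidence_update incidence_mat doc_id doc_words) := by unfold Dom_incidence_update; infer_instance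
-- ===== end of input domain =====

-- B replaces A's per-word-occurrence increment loop with a term-frequency table built first, then one
-- batched update per distinct term (alternative decomposition, same return value; both Pythons also
-- mutate incidence_mat in place identically — the theorems below are about the returned value).

-- dict-of-dicts <-> the association-list argument/return type
def pvToD (m : List (String × List (String × Int))) : PySem.Dict String (PySem.Dict String Int) :=
  PySem.Dict.mk (m.map (fun p => (p.1, PySem.Dict.mk p.2)))
def pvFromD (d : PySem.Dict String (PySem.Dict String Int)) : List (String × List (String × Int)) :=
  d.items.map (fun p => (p.1, p.2.items))

-- ===== PORT A =====
def incidence_update (incidence_mat : List (String × List (String × Int))) (doc_id : String) (doc_words : List String) : List (String × List (String × Int)) :=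
  pvFromD (doc_words.foldl
    (fun m term =>
      -- if term not in incidence_mat: incidence_mat[term] = dict()
      let m := if m.contains term then m else m.insert term PySem.Dict.empty
      -- doc_stat = incidence_mat[term]   (term is always present here, so the getD default is never used)
      let doc_stat := (m.get? term).getD PySem.Dict.empty
      -- if doc_id in doc_stat: doc_stat[doc_id] += 1 else: doc_stat[doc_id] = 1
      let doc_stat := if doc_stat.contains doc_id
        then doc_stat.insert doc_id (doc_stat.getD doc_id 0 + 1)
        else doc_stat.insert doc_id 1
      -- incidence_mat[term] = doc_stat
      m.insert term doc_stat)
    (pvToD incidence_mat))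

-- ===== PORT B =====
def incidence_update_alt (incidence_mat : List (String × List (String × Int))) (doc_id : String) (doc_words : List String) : List (String × List (String × Int)) :=
  -- counts = {}; for w in doc_words: counts[w] = counts.get(w, 0) + 1
  let counts := doc_words.foldl (fun (d : PySem.Dict String Int) w => d.insert w (d.getD w 0 + 1)) PySem.Dict.empty
  -- for term, c in counts.items(): doc_stat = incidence_mat.setdefault(term, {}); doc_stat[doc_id] = doc_stat.get(doc_id, 0) + c
  pvFromD (counts.items.foldl
    (fun m tc =>
      let m := m.setdefault tc.1 PySem.Dict.empty
      let doc_stat := (m.get? tc.1).getD PySem.Dict.empty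
      m.insert tc.1 (doc_stat.insert doc_id (doc_stat.getD doc_id 0 + tc.2)))
    (pvToD incidence_mat))

-- ===== PRECONDITION & SPEC =====
def Spec_incidence_update (incidence_mat : List (String × List (String × Int))) (doc_id : String) (doc_words : List String) (out : List (String × List (String × Int))) : Prop := out = incidence_update_alt incidence_mat doc_id doc_words
instance (incidence_mat : List (String × List (String × Int))) (doc_id : String) (doc_words : List String) (out : List (String × List (String × Int))) : Decidable (Spec_incidence_update incidence_mat doc_id doc_words out) := by unfold Spec_incidence_update; infer_instance

-- ===== CLAIM (what is proved, stated in full; the proofs are below) =====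
def Claim_equal_incidence_update : Prop := ∀ (incidence_mat : List (String × List (String × Int))) (doc_id : String) (doc_words : List String), Dom_incidence_update incidence_mat doc_id doc_words → Spec_incidence_update incidence_mat doc_id doc_words (incidence_update incidence_mat doc_id doc_words)

-- ===== LEMMAS AND PROOFS =====

-- the common single-term update both loop bodies reduce to: bump doc_id's count in term's row by c
def pvG (doc_id : String) (m : PySem.Dict String (PySem.Dict String Int)) (t : String) (c : Int) : PySem.Dict String (PySem.Dict String Int) :=
  let p := (m.get? t).getD PySem.Dict.empty
  m.insert t (p.insert doc_id (p.getD doc_id 0 + c))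

-- A's loop body is pvG with c = 1
theorem pvStepA (doc_id : String) (m : PySem.Dict String (PySem.Dict String Int)) (term : String) :
    (let m := if m.contains term then m else m.insert term PySem.Dict.empty
     let doc_stat := (m.get? term).getD PySem.Dict.empty
     let doc_stat := if doc_stat.contains doc_id
       then doc_stat.insert doc_id (doc_stat.getD doc_id 0 + 1)
       else doc_stat.insert doc_id 1
     m.insert term doc_stat) = pvG doc_id m term 1 := by
  cases hc : m.contains term with
  | true =>
    simp only [pvG, hc, if_true]
    set p := (m.get? term).getD PySem.Dict.empty with hp
    cases hd : p.contains doc_id with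
    | true => simp [hd]
    | false =>
      rw [PySem.Dict.getD_of_not_contains _ _ hd]
      simp [hd]
  | false =>
    simp only [pvG, hc, if_false, Bool.false_eq_true]
    rw [PySem.Dict.get?_insert_self]
    have h0 : (m.get? term) = none := by
      rw [PySem.Dict.get?_eq_none_iff_contains]; exact hc
    simp [h0, PySem.Dict.insert_insert_self, PySem.Dict.contains_empty, PySem.Dict.getD_empty]

-- B's loop body is pvG with tc's count
theorem pvStepB (doc_id : String) (m : PySem.Dict String (PySem.Dict String Int)) (t : String) (c : Int) :
    (let m := m.setdefault t PySem.Dict.empty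
     let doc_stat := (m.get? t).getD PySem.Dict.empty
     m.insert t (doc_stat.insert doc_id (doc_stat.getD doc_id 0 + c))) = pvG doc_id m t c := by
  cases hc : m.contains t with
  | true => simp [pvG, PySem.Dict.setdefault_of_contains _ _ hc]
  | false =>
    have h0 : (m.get? t) = none := by rw [PySem.Dict.get?_eq_none_iff_contains]; exact hc
    simp only [pvG, PySem.Dict.setdefault_of_not_contains _ _ hc]
    rw [PySem.Dict.get?_insert_self]
    simp [h0, PySem.Dict.insert_insert_self]

-- two consecutive bumps of the same term merge
theorem pvMerge (doc_id : String) (m : PySem.Dict String (PySem.Dict String Int)) (w : String) (a b : Int) :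
    pvG doc_id (pvG doc_id m w a) w b = pvG doc_id m w (a + b) := by
  simp only [pvG, PySem.Dict.get?_insert_self, Option.getD_some, PySem.Dict.insert_insert_self,
    PySem.Dict.getD_insert_self]
  ring_nf

-- inserts at distinct keys commute when one key is already present (in-place overwrite)
theorem pvInsertComm {ν : Type} (m : PySem.Dict String ν) (w t : String) (vw vt : ν)
    (hw : m.contains w = true) (hne : t ≠ w) :
    (m.insert w vw).insert t vt = (m.insert t vt).insert w vw := by
  apply PySem.Dict.ext
  have hcw : (m.insert t vt).contains w = true := by
    rw [PySem.Dict.contains_insert]; simp [hw]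
  have hct : (m.insert w vw).contains t = m.contains t := by
    rw [PySem.Dict.contains_insert]; simp [hne]
  cases ht : m.contains t with
  | true =>
    rw [PySem.Dict.items_insert_of_contains _ _ (by rw [hct]; exact ht),
        PySem.Dict.items_insert_of_contains _ _ hw,
        PySem.Dict.items_insert_of_contains _ _ hcw,
        PySem.Dict.items_insert_of_contains _ _ ht]
    rw [List.map_map, List.map_map]
    apply List.map_congr_left
    intro p _
    by_cases h1 : p.1 = w <;> by_cases h2 : p.1 = t <;>
      simp_all [hne, Ne.symm hne]
  | false =>
    rw [PySem.Dict.items_insert_of_not_contains _ _ (by rw [hct]; exact ht),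
        PySem.Dict.items_insert_of_contains _ _ hw,
        PySem.Dict.items_insert_of_contains _ _ hcw,
        PySem.Dict.items_insert_of_not_contains _ _ ht]
    rw [List.map_append]
    simp only [List.map, List.append_cancel_left_eq]
    simp [hne]

-- bumps of distinct terms commute once w's row exists
theorem pvComm (doc_id : String) (m : PySem.Dict String (PySem.Dict String Int)) (w t : String) (a b : Int)
    (hw : m.contains w = true) (hne : t ≠ w) :
    pvG doc_id (pvG doc_id m w a) t b = pvG doc_id (pvG doc_id m t b) w a := by
  simp only [pvG]
  rw [PySem.Dict.get?_insert_of_ne _ _ hne, PySem.Dict.get?_insert_of_ne _ _ (Ne.symm hne)]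
  exact pvInsertComm m w t _ _ hw hne

theorem pvContainsG (doc_id : String) (m : PySem.Dict String (PySem.Dict String Int)) (t w : String) (c : Int)
    (hw : m.contains w = true) : (pvG doc_id m t c).contains w = true := by
  simp [pvG, PySem.Dict.contains_insert, hw]

-- a trailing bump of w moves left past a fold over pairs with other keys
theorem pvPush (doc_id : String) (w : String) (L : List (String × Int)) (m : PySem.Dict String (PySem.Dict String Int))
    (h : ∀ p ∈ L, p.1 ≠ w) (hw : m.contains w = true) :
    pvG doc_id (L.foldl (fun m tc => pvG doc_id m tc.1 tc.2) m) w 1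
      = L.foldl (fun m tc => pvG doc_id m tc.1 tc.2) (pvG doc_id m w 1) := by
  induction L generalizing m with
  | nil => rfl
  | cons p L ih =>
    simp only [List.foldl_cons]
    rw [ih _ (fun q hq => h q (List.mem_cons_of_mem _ hq))
          (pvContainsG doc_id m p.1 w p.2 hw)]
    rw [pvComm doc_id m w p.1 1 p.2 hw (h p (List.mem_cons_self))]

-- one more occurrence of w folded into the counter = one extra bump after the batched fold
theorem pvQ (doc_id : String) (d : PySem.Dict String Int) (w : String) (m : PySem.Dict String (PySem.Dict String Int))
    (hn : d.keys.Nodup) :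
    ((d.insert w (d.getD w 0 + 1)).items).foldl (fun m tc => pvG doc_id m tc.1 tc.2) m
      = pvG doc_id (d.items.foldl (fun m tc => pvG doc_id m tc.1 tc.2) m) w 1 := by
  cases hc : d.contains w with
  | false =>
    rw [PySem.Dict.items_insert_of_not_contains _ _ hc, List.foldl_append]
    rw [PySem.Dict.getD_of_not_contains _ _ hc]
    simp [pvG]
  | true =>
    -- split d.items at w's (unique) entry
    obtain ⟨p, hpmem, hpw⟩ := List.any_eq_true.mp hc
    obtain ⟨w', v⟩ := p
    have hw' : w' = w := by simpa using hpw
    subst hw'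
    obtain ⟨L1, L2, hsplit⟩ := List.append_of_mem hpmem
    have hkeys : d.keys = L1.map (·.1) ++ w' :: L2.map (·.1) := by
      simp only [PySem.Dict.keys, hsplit]; simp
    have hn' := hn
    rw [hkeys] at hn'
    have hB : (w' :: List.map (fun x => x.1) L2).Nodup := (List.nodup_append.mp hn').2.1
    have h1 : ∀ p ∈ L1, p.1 ≠ w' := by
      intro q hq h
      have hm : q.1 ∈ List.map (fun x => x.1) L1 := List.mem_map_of_mem hq
      rw [h] at hm
      exact List.disjoint_of_nodup_append hn' hm List.mem_cons_self
    have h2 : ∀ p ∈ L2, p.1 ≠ w' := by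
      intro q hq h
      have hm : q.1 ∈ List.map (fun x => x.1) L2 := List.mem_map_of_mem hq
      rw [h] at hm
      exact (List.nodup_cons.mp hB).1 hm
    have hv : d.getD w' 0 = v := PySem.Dict.getD_of_mem_items d hpmem hn 0
    rw [PySem.Dict.items_insert_of_contains _ _ hc, hsplit]
    rw [List.map_append, List.map_cons]
    have hmapL1 : L1.map (fun p => if (p.1 == w') = true then (w', d.getD w' 0 + 1) else p) = L1 := by
      apply List.map_congr_left ?_ |>.trans (List.map_id _)
      intro q hq; simp [h1 q hq]
    have hmapL2 : L2.map (fun p => if (p.1 == w') = true then (w', d.getD w' 0 + 1) else p) = L2 := by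
      apply List.map_congr_left ?_ |>.trans (List.map_id _)
      intro q hq; simp [h2 q hq]
    rw [hmapL1, hmapL2, List.foldl_append, List.foldl_append, List.foldl_cons, List.foldl_cons]
    simp only [hv, beq_self_eq_true, if_true]
    rw [pvPush doc_id w' L2 _ h2 (by simp [pvG, PySem.Dict.contains_insert]), pvMerge]

-- batched fold over the counter = per-occurrence fold
theorem pvMain (doc_id : String) (ws : List String) (m : PySem.Dict String (PySem.Dict String Int)) :
    (PySem.Dict.counter ws).items.foldl (fun m tc => pvG doc_id m tc.1 tc.2) m
      = ws.foldl (fun m t => pvG doc_id m t 1) m := by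
  induction ws using List.reverseRecOn with
  | nil => rfl
  | append_singleton ws w ih =>
    rw [PySem.Dict.counter_append_singleton, List.foldl_append, List.foldl_cons, List.foldl_nil, ← ih]
    simp only [PySem.Dict.modify]
    exact pvQ doc_id (PySem.Dict.counter ws) w m (PySem.Dict.nodup_keys_counter ws)

-- ===== VERDICT (by name: the statement is the Claim_ definition above) =====
theorem incidence_update_spec : Claim_equal_incidence_update := by
  intro mat did ws _
  show incidence_update mat did ws = incidence_update_alt mat did ws
  unfold incidence_update incidence_update_alt
  have eA : (fun (m : PySem.Dict String (PySem.Dict String Int)) (term : String) =>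
      let m := if m.contains term then m else m.insert term PySem.Dict.empty
      let doc_stat := (m.get? term).getD PySem.Dict.empty
      let doc_stat := if doc_stat.contains did
        then doc_stat.insert did (doc_stat.getD did 0 + 1)
        else doc_stat.insert did 1
      m.insert term doc_stat) = fun m term => pvG did m term 1 :=
    funext fun m => funext fun t => pvStepA did m t
  have eB : (fun (m : PySem.Dict String (PySem.Dict String Int)) (tc : String × Int) =>
      let m := m.setdefault tc.1 PySem.Dict.empty
      let doc_stat := (m.get? tc.1).getD PySem.Dict.empty
      m.insert tc.1 (doc_stat.insert did (doc_stat.getD did 0 + tc.2))) = fun m tc => pvG did m tc.1 tc.2 :=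
    funext fun m => funext fun tc => pvStepB did m tc.1 tc.2
  rw [eA, eB]
  have hc : ws.foldl (fun (d : PySem.Dict String Int) w => d.insert w (d.getD w 0 + 1)) PySem.Dict.empty = PySem.Dict.counter ws :=
    PySem.Dict.foldl_insert_getD_add_one_eq_counter ws
  rw [hc]
  exact congrArg pvFromD (pvMain did ws (pvToD mat)).symm
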